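-- pv_equiv track=rewrite | github.com/Oti736/Invatare-Python-Git | coconuts.py | bit_translator
-- ===== SOURCE A (Python) =====
-- def bit_translator(string,char = "a"):
--     b = " ".join(format(ord(char), "08b") for char in string)
--     output = []
--     for bit in b:
--         if bit =="1":
--             output.append(char.upper())
--         else:
--             output.append(char.lower())
--     return "".join(output)
-- ===== SOURCE B (Python) =====
-- def bit_translator(string, char="a"):
--     cases = (char.lower(), char.upper())
--     parts = []
--     for c in string:
--         n = ord(c)
--         block = ""
--         for _ in range(8):
--             block = cases[n & 1] + block
--             n >>= 1
--         parts.append(block)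
--     return cases[0].join(parts)
-- ===== Notes on version B (the rewrite author's own statement) =====
-- stated objective: alternative
-- what changed: B never formats or scans any binary string: it extracts each character's 8 bits arithmetically (n & 1, n >>= 1), building each 8-case block back-to-front, and joins the blocks with char.lower(), where A builds a space-joined 8-bit format string per character and scans it bit-character by bit-character.
import Mathlib
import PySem

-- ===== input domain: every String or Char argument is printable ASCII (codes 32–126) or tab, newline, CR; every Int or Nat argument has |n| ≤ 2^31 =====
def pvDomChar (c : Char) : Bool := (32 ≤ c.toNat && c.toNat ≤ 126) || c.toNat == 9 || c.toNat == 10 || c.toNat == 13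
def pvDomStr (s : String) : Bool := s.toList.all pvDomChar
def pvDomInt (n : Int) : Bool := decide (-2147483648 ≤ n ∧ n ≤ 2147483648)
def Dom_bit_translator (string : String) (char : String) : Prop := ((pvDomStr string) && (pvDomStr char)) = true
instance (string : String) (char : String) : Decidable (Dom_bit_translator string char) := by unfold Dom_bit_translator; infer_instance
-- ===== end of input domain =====

-- B extracts the 8 bits of each character arithmetically (n & 1, n >>= 1), building each
-- block back-to-front, instead of formatting a binary string and scanning it (alternative).

-- ===== PORT A =====
def bit_translator (string : String) (char : String) : String :=
  -- b = " ".join(format(ord(char), "08b") for char in string)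
  let b : List Char :=
    PySem.Chars.join [' ']
      (string.toList.map (fun c => PySem.Chars.zfill (PySem.Int.toBinChars (c.toNat : Int)) 8))
  -- output = []; for bit in b: append char.upper() / char.lower()
  let output : List (List Char) :=
    b.foldl (fun out bit =>
      out ++ [if bit = '1' then (PySem.Str.upper char).toList else (PySem.Str.lower char).toList]) []
  -- return "".join(output)
  String.ofList (PySem.Chars.join [] output)

-- ===== PORT B =====
-- inner loop: for _ in range(8): block = cases[n & 1] + block; n >>= 1
def pvPeel (lo up : List Char) : Nat → Nat × List Char → Nat × List Char
  | 0, st => st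
  | k + 1, (n, block) => pvPeel lo up k (n / 2, (if n % 2 = 1 then up else lo) ++ block)

def bit_translator_alt (string : String) (char : String) : String :=
  let lo := (PySem.Str.lower char).toList   -- cases[0]
  let up := (PySem.Str.upper char).toList   -- cases[1]
  -- parts = []; for c in string: …peel 8 bits…; parts.append(block)
  let parts : List (List Char) :=
    string.toList.map (fun c => (pvPeel lo up 8 (c.toNat, [])).2)
  -- return cases[0].join(parts)
  String.ofList (PySem.Chars.join lo parts)

-- ===== PRECONDITION & SPEC =====
def Spec_bit_translator (string : String) (char : String) (out : String) : Prop := out = bit_translator_alt string char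
instance (string : String) (char : String) (out : String) : Decidable (Spec_bit_translator string char out) := by unfold Spec_bit_translator; infer_instance

-- ===== CLAIM (what is proved, stated in full; the proofs are below) =====
def Claim_equal_bit_translator : Prop := ∀ (string : String) (char : String), Dom_bit_translator string char → Spec_bit_translator string char (bit_translator string char)

-- ===== LEMMAS AND PROOFS =====

-- the low k bits of n, most significant first, as '0'/'1' characters
def pvBits : Nat → Nat → List Char
  | 0, _ => []
  | k + 1, n => pvBits k (n / 2) ++ [if n % 2 = 1 then '1' else '0']

theorem pvPeel_spec (lo up : List Char) (k : Nat) :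
    ∀ n block, (pvPeel lo up k (n, block)).2
      = (pvBits k n).flatMap (fun bit => if bit = '1' then up else lo) ++ block := by
  induction k with
  | zero => intro n block; simp [pvPeel, pvBits]
  | succ k ih =>
    intro n block
    simp only [pvPeel, pvBits, ih, List.flatMap_append, List.flatMap_cons,
      List.flatMap_nil, List.append_nil, List.append_assoc]
    by_cases h : n % 2 = 1 <;> simp [h]

theorem pvBits_eq_format :
    ∀ n : Fin 128, pvBits 8 n.val = PySem.Chars.zfill (PySem.Int.toBinChars (n.val : Int)) 8 := by
  decide

-- "".join(parts) flattens
theorem join_nil_eq_flatten (xs : List (List Char)) :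
    PySem.Chars.join [] xs = xs.flatten := by
  induction xs with
  | nil => simp [PySem.Chars.join_nil]
  | cons p rest ih =>
    cases rest with
    | nil => simp [PySem.Chars.join_singleton]
    | cons q rest' =>
      rw [PySem.Chars.join_cons_cons]
      simp [ih]

-- flatMap distributes over a sep-join
theorem flatMap_join (f : Char → List Char) (sep : List Char) (xs : List (List Char)) :
    (PySem.Chars.join sep xs).flatMap f
      = PySem.Chars.join (sep.flatMap f) (xs.map (fun p => p.flatMap f)) := by
  induction xs with
  | nil => simp [PySem.Chars.join_nil]
  | cons p rest ih =>
    cases rest with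
    | nil => simp [PySem.Chars.join_singleton]
    | cons q rest' =>
      rw [PySem.Chars.join_cons_cons]
      simp only [List.map_cons] at ih ⊢
      rw [PySem.Chars.join_cons_cons, List.flatMap_append, List.flatMap_append, ih]

-- A, rewritten as a lo-separated join of per-character bit blocks
theorem core (up lo : List Char) (bs : List (List Char)) :
    PySem.Chars.join []
      ((PySem.Chars.join [' '] bs).foldl (fun out bit => out ++ [if bit = '1' then up else lo]) [])
      = PySem.Chars.join lo
          (bs.map (fun p => p.flatMap (fun bit => if bit = '1' then up else lo))) := by
  rw [PySem.List.foldl_append_eq_flatMap, List.nil_append, join_nil_eq_flatten]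
  have h1 : ∀ (l : List Char),
      (l.flatMap (fun bit => [if bit = '1' then up else lo])).flatten
        = l.flatMap (fun bit => if bit = '1' then up else lo) := by
    intro l
    induction l with
    | nil => rfl
    | cons x xs ih =>
      simp only [List.flatMap_cons, List.flatten_append, ih]
      simp
  rw [h1, flatMap_join]
  have hsep : (([' '] : List Char).flatMap (fun bit => if bit = '1' then up else lo)) = lo := by
    simp
  rw [hsep]

-- ===== VERDICT (by name: the statement is the Claim_ definition above) =====
theorem bit_translator_spec : Claim_equal_bit_translator := by
  intro string char hdom
  unfold Spec_bit_translator bit_translator bit_translator_alt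
  simp only
  rw [core, List.map_map]
  congr 1
  refine congrArg _ (List.map_congr_left ?_)
  intro c hc
  have hdc : pvDomChar c = true := by
    have hs : pvDomStr string = true := by
      unfold Dom_bit_translator at hdom; exact (Bool.and_eq_true_iff.mp hdom).1
    exact List.all_eq_true.mp hs c hc
  have hlt : c.toNat < 128 := by
    unfold pvDomChar at hdc
    simp only [Bool.or_eq_true, Bool.and_eq_true, decide_eq_true_eq, beq_iff_eq] at hdc
    omega
  simp only [Function.comp]
  rw [pvPeel_spec, List.append_nil, pvBits_eq_format ⟨c.toNat, hlt⟩]
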